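-- pv_equiv track=rewrite | github.com/gahvs/ciencia-da-computacao | Recursão/Python/paresImparesRecursivo.py | func
-- ===== SOURCE A (Python) =====
-- def func(l):
--
--     if len(l) == 0:
--         return []
--
--     if l[0] % 2 == 0:
--         _list = [True]
--         return _list + func(l[1:])
--
--     else:
--         _list = [False]
--         return _list + func(l[1:])
-- ===== SOURCE B (Python) =====
-- def func(l):
--     return [x % 2 == 0 for x in l]
-- ===== Notes on version B (the rewrite author's own statement) =====
-- stated objective: faster
-- what changed: Replaced the recursion that copies the tail with l[1:] at every step by a single list comprehension over l.
import Mathlib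
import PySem

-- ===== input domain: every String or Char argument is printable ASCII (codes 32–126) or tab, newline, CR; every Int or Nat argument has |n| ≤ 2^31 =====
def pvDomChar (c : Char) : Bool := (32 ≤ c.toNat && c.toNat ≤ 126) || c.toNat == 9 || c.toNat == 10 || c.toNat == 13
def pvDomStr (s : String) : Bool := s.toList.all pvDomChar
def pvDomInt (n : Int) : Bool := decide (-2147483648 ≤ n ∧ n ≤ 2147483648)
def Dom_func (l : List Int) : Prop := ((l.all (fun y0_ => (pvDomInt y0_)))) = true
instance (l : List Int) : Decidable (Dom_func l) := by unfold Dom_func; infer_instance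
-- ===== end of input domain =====

-- B replaces A's O(n^2) recursion (tail copied by l[1:] each step) with one O(n) list comprehension.

-- ===== PORT A =====
-- A recurses: empty → [], else [l[0] % 2 == 0] ++ func(l[1:]); the cons pattern is l[0]/l[1:].
def func : List Int → List Bool
  | [] => []
  | x :: rest =>
      if PySem.Int.mod x 2 = 0 then [true] ++ func rest
      else [false] ++ func rest

-- ===== PORT B =====
def func_alt (l : List Int) : List Bool := l.map (fun x => decide (PySem.Int.mod x 2 = 0))

-- ===== PRECONDITION & SPEC =====
def Spec_func (l : List Int) (out : List Bool) : Prop := out = func_alt l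
instance (l : List Int) (out : List Bool) : Decidable (Spec_func l out) := by unfold Spec_func; infer_instance

-- ===== CLAIM (what is proved, stated in full; the proofs are below) =====
def Claim_equal_func : Prop := ∀ (l : List Int), Dom_func l → Spec_func l (func l)

-- ===== LEMMAS AND PROOFS =====
theorem func_eq_alt (l : List Int) : func l = func_alt l := by
  induction l with
  | nil => rfl
  | cons x rest ih =>
      simp only [func, func_alt, List.map]
      split_ifs with h <;> simp_all [func_alt]

-- ===== VERDICT (by name: the statement is the Claim_ definition above) =====
theorem func_spec : Claim_equal_func := by
  intro l _
  exact func_eq_alt l
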